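-- pv_equiv track=rewrite | github.com/sijadev/cortex-py | cortex-cli/cortex/integrations/cross_vault_linker.py | _find_insertion_point
-- ===== SOURCE A (Python) =====
-- from typing import Dict, List, Tuple, Optional, Set, Any
--
-- def _find_insertion_point(content: str, link_purpose: str) -> Optional[int]:
--     """Find the best place to insert a link in the file"""
--     lines = content.split('\n')
--
--     # Look for existing link sections
--     link_section_patterns = ['## Related', '## Links', '## See Also', '## References']
--
--     for i, line in enumerate(lines):
--         for pattern in link_section_patterns:
--             if pattern.lower() in line.lower():
--                 # Insert after the header
--                 return i + 1
--
--     # If no link section exists, create one near the end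
--     for i in reversed(range(len(lines))):
--         line = lines[i].strip()
--         if line and not line.startswith('#') and not line.startswith('---'):
--             # Insert section header first
--             if i + 1 < len(lines):
--                 lines.insert(i + 1, '')
--                 lines.insert(i + 2, '## Related Links')
--                 return i + 3
--             else:
--                 lines.append('')
--                 lines.append('## Related Links')
--                 return len(lines)
--
--     return len(lines)
-- ===== SOURCE B (Python) =====
-- def _is_content(line: str) -> bool:
--     s = line.strip()
--     return bool(s) and not s.startswith('#') and not s.startswith('---')
--
--
-- def _has_pattern(line: str) -> bool:
--     low = line.lower()
--     return any(p in low for p in ('## related', '## links', '## see also', '## references'))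
--
--
-- def _find_insertion_point(content: str, link_purpose: str):
--     """Single pass: track first pattern-header index and last content-line index."""
--     lines = content.split('\n')
--     first_pattern = None
--     last_content = None
--     for i, line in enumerate(lines):
--         if first_pattern is None and _has_pattern(line):
--             first_pattern = i
--         if _is_content(line):
--             last_content = i
--     if first_pattern is not None:
--         return first_pattern + 1
--     if last_content is not None:
--         return last_content + 3
--     return len(lines)
-- ===== Notes on version B (the rewrite author's own statement) =====
-- stated objective: alternative
-- what changed: A's forward pattern scan followed by a separate reversed-index fallback scan (with its dead insert/append branches) is replaced by one forward pass over enumerate(lines) maintaining two accumulators, the first pattern-header index and the last content-line index, combined after the loop.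
import Mathlib
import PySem

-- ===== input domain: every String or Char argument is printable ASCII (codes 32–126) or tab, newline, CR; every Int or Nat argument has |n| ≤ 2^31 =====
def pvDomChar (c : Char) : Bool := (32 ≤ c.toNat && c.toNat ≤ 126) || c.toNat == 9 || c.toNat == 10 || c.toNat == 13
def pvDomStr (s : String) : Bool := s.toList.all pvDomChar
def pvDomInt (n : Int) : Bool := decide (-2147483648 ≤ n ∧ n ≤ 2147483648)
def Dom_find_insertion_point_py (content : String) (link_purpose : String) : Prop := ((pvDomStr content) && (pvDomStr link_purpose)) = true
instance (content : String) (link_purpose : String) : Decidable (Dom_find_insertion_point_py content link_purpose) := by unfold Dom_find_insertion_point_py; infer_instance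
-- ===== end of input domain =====

-- B replaces A's forward pattern scan plus reversed-index fallback scan by one forward pass
-- keeping two accumulators (first pattern index, last content index): alternative decomposition,
-- same cost. A mutates only its local `lines` list, so only the return value is observable.

-- ===== PORT A =====

-- A: the hard-coded header patterns
def pvPatternsA : List String := ["## Related", "## Links", "## See Also", "## References"]

-- A: inner `for pattern in link_section_patterns: if pattern.lower() in line.lower()`
def pvPatLoopA (line : String) : List String → Bool
  | [] => false
  | p :: ps =>
    if PySem.Str.isIn (PySem.Str.lower p) (PySem.Str.lower line) then true
    else pvPatLoopA line ps

-- A: `for i, line in enumerate(lines): … return i + 1`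
def pvFwdA : List String → Int → Option Int
  | [], _ => none
  | line :: rest, i =>
    if pvPatLoopA line pvPatternsA then some (i + 1) else pvFwdA rest (i + 1)

-- A: `for i in reversed(range(len(lines))): …`; the two mutating branches return
-- `i + 3` and `len(lines)` after the two appends, transcribed literally
def pvBwdA (lines : List String) : List Int → Int
  | [] => (lines.length : Int)
  | i :: rest =>
    let line := PySem.Str.strip ((PySem.List.pyGet? lines i).getD "")
    if line ≠ "" && !(PySem.Str.startswith line "#") && !(PySem.Str.startswith line "---") then
      if i + 1 < (lines.length : Int) then i + 3
      else ((lines ++ ["", "## Related Links"]).length : Int)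
    else pvBwdA lines rest

def find_insertion_point_py (content : String) (link_purpose : String) : Option Int :=
  let lines := (PySem.Str.split? content "\n").getD []
  match pvFwdA lines 0 with
  | some r => some r
  | none => some (pvBwdA lines ((PySem.List.pyRange 0 (lines.length : Int)).reverse))

-- ===== PORT B =====

-- B: `_is_content(line)`
def pvIsContent (line : String) : Bool :=
  let s := PySem.Str.strip line
  s ≠ "" && !(PySem.Str.startswith s "#") && !(PySem.Str.startswith s "---")

-- B: `_has_pattern(line)`
def pvHasPat (line : String) : Bool :=
  let low := PySem.Str.lower line
  ["## related", "## links", "## see also", "## references"].any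
    (fun p => PySem.Str.isIn p low)

-- B: the single `for i, line in enumerate(lines)` loop carrying (first_pattern, last_content)
def pvLoopB : List String → Int → Option Int → Option Int → Option Int × Option Int
  | [], _, fp, lc => (fp, lc)
  | line :: rest, i, fp, lc =>
    let fp' := if fp.isNone && pvHasPat line then some i else fp
    let lc' := if pvIsContent line then some i else lc
    pvLoopB rest (i + 1) fp' lc'

def find_insertion_point_py_alt (content : String) (link_purpose : String) : Option Int :=
  let lines := (PySem.Str.split? content "\n").getD []
  match pvLoopB lines 0 none none with
  | (some i, _) => some (i + 1)
  | (none, some j) => some (j + 3)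
  | (none, none) => some (lines.length : Int)

-- ===== PRECONDITION & SPEC =====
def Spec_find_insertion_point_py (content : String) (link_purpose : String) (out : Option Int) : Prop := out = find_insertion_point_py_alt content link_purpose
instance (content : String) (link_purpose : String) (out : Option Int) : Decidable (Spec_find_insertion_point_py content link_purpose out) := by unfold Spec_find_insertion_point_py; infer_instance

-- ===== CLAIM (what is proved, stated in full; the proofs are below) =====
def Claim_equal_find_insertion_point_py : Prop := ∀ (content : String) (link_purpose : String), Dom_find_insertion_point_py content link_purpose → Spec_find_insertion_point_py content link_purpose (find_insertion_point_py content link_purpose)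

-- ===== LEMMAS AND PROOFS =====

-- A's inner pattern loop agrees with B's `any` over the pre-lowered patterns
theorem patLoopA_eq (line : String) : pvPatLoopA line pvPatternsA = pvHasPat line := by
  simp [pvPatLoopA, pvPatternsA, pvHasPat]
  rfl

-- index (from the front) of the first pattern line
def pvFirstPat : List String → Option Nat
  | [] => none
  | l :: rest => if pvHasPat l then some 0 else (pvFirstPat rest).map (· + 1)

-- index (from the front) of the last content line
def pvLastContent : List String → Option Nat
  | [] => none
  | l :: rest =>
    match pvLastContent rest with
    | some j => some (j + 1)
    | none => if pvIsContent l then some 0 else none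

theorem fwdA_eq (lines : List String) (i : Int) :
    pvFwdA lines i = (pvFirstPat lines).map (fun j => i + j + 1) := by
  induction lines generalizing i with
  | nil => rfl
  | cons l rest ih =>
    simp only [pvFwdA, pvFirstPat, patLoopA_eq]
    by_cases h : pvHasPat l = true
    · simp [h]
    · simp only [h, Bool.false_eq_true, ite_false, ih (i + 1)]
      cases pvFirstPat rest
      · simp
      · simp; ring

theorem loopB_fst (lines : List String) (i : Int) (fp lc : Option Int) :
    (pvLoopB lines i fp lc).1 =
      match fp with
      | some x => some x
      | none => (pvFirstPat lines).map (fun j => i + j) := by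
  induction lines generalizing i fp lc with
  | nil => cases fp <;> rfl
  | cons l rest ih =>
    simp only [pvLoopB, pvFirstPat, ih]
    cases fp with
    | some x => simp
    | none =>
      simp only [Option.isNone_none, Bool.true_and]
      by_cases h : pvHasPat l = true
      · simp [h]
      · simp only [h, Bool.false_eq_true, ite_false]
        cases pvFirstPat rest
        · simp
        · simp; ring

theorem loopB_snd (lines : List String) (i : Int) (fp lc : Option Int) :
    (pvLoopB lines i fp lc).2 =
      match pvLastContent lines with
      | some j => some (i + j)
      | none => lc := by
  induction lines generalizing i fp lc with
  | nil => rfl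
  | cons l rest ih =>
    simp only [pvLoopB, pvLastContent, ih]
    cases hr : pvLastContent rest with
    | some j => simp; ring
    | none =>
      by_cases h : pvIsContent l = true
      · simp [h]
      · simp only [h, Bool.false_eq_true, ite_false]

-- pvLastContent over a snoc
theorem lastContent_snoc (xs : List String) (l : String) :
    pvLastContent (xs ++ [l]) =
      if pvIsContent l then some xs.length else pvLastContent xs := by
  induction xs with
  | nil => simp [pvLastContent]
  | cons x xs ih =>
    simp only [List.cons_append, pvLastContent, ih]
    by_cases hc : pvIsContent l = true
    · simp [hc]
    · simp only [hc, Bool.false_eq_true, ite_false]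

-- the condition tested by A's fallback scan is B's `_is_content`
theorem isContent_cond (l : String) :
    (PySem.Str.strip l ≠ "" && !(PySem.Str.startswith (PySem.Str.strip l) "#") &&
      !(PySem.Str.startswith (PySem.Str.strip l) "---")) = pvIsContent l := rfl

-- the reversed-range fallback scan of A computed in terms of pvLastContent
theorem bwdA_eq (lines : List String) (k : Nat) (hk : k ≤ lines.length) :
    pvBwdA lines ((PySem.List.pyRange 0 (k : Int)).reverse) =
      match pvLastContent (lines.take k) with
      | some j => (j : Int) + 3
      | none => (lines.length : Int) := by
  induction k with
  | zero => simp [PySem.List.pyRange_one_eq_nil, pvBwdA, pvLastContent]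
  | succ k ih =>
    have hklt : k < lines.length := Nat.lt_of_succ_le hk
    have hsnoc : PySem.List.pyRange 0 (((k + 1 : Nat)) : Int) =
        PySem.List.pyRange 0 (k : Int) ++ [(k : Int)] := by
      rw [show (((k + 1 : Nat)) : Int) = (k : Int) + 1 by push_cast; ring]
      exact PySem.List.pyRange_one_succ_right (by positivity)
    have hget : PySem.List.pyGet? lines (k : Int) = some (lines[k]!) := by
      rw [PySem.List.pyGet?_natCast, List.getElem?_eq_getElem hklt]
      simp [getElem!_pos, hklt]
    have htake : lines.take (k + 1) = lines.take k ++ [lines[k]!] := by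
      rw [List.take_add_one, List.getElem?_eq_getElem hklt]
      simp [getElem!_pos, hklt]
    rw [hsnoc, List.reverse_append]
    simp only [List.reverse_singleton, List.singleton_append, pvBwdA, hget, Option.getD_some]
    rw [isContent_cond, htake, lastContent_snoc]
    have hlen : (lines.take k).length = k := List.length_take_of_le (Nat.le_of_lt hklt)
    by_cases hc : pvIsContent (lines[k]!) = true
    · rw [if_pos hc, if_pos hc]
      by_cases hlt : (k : Int) + 1 < (lines.length : Int)
      · rw [if_pos hlt]; simp [hlen]
      · rw [if_neg hlt]
        simp [hlen]
        have hkl : k + 1 = lines.length := by omega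
        rw [← hkl]
        push_cast
        ring
    · rw [if_neg hc, if_neg hc]
      exact ih (Nat.le_of_lt hklt)

-- ===== VERDICT (by name: the statement is the Claim_ definition above) =====
theorem find_insertion_point_py_spec : Claim_equal_find_insertion_point_py := by
  intro content link_purpose _
  unfold Spec_find_insertion_point_py
  simp only [find_insertion_point_py, find_insertion_point_py_alt]
  generalize (PySem.Str.split? content "\n").getD [] = lines
  have hB : pvLoopB lines 0 none none =
      ((pvFirstPat lines).map (fun j => (0 : Int) + j),
        match pvLastContent lines with
        | some j => some ((0 : Int) + j)
        | none => none) :=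
    Prod.ext (loopB_fst lines 0 none none) (loopB_snd lines 0 none none)
  rw [fwdA_eq, hB]
  have hb := bwdA_eq lines lines.length (le_refl _)
  rw [List.take_length] at hb
  cases hf : pvFirstPat lines with
  | some j => simp
  | none =>
    cases hlc : pvLastContent lines with
    | some j => simp [hb, hlc]
    | none => simp [hb, hlc]
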